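-- pv_equiv track=rewrite | github.com/staffanosp/Advent-of-Code | 2025/python/Day-11/Day_11.py | solution02
-- ===== SOURCE A (Python) =====
-- from collections import deque, defaultdict
--
-- input_data = {}
--
-- def memoize(k, f, memo):
--
--     if not k in memo:
--         memo[k] = f(k, memo)
--
--     return memo[k]
--
-- def solution02(input_data):
--
--     START = "svr"
--     END = "out"
--
--     def node_factory():
--         return {
--             "inputs": [],
--             "outputs": [],
--         }
--
--     nodes = defaultdict(node_factory)
--
--     # add the inputs to the nodes
--     for a, outputs in input_data.items():
--         for b in outputs:
--             nodes[a]["outputs"].append(b)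
--             nodes[b]["inputs"].append(a)
--
--     def step(args, memo):
--
--         node, score = args
--
--         if node in {"dac", "fft"}:
--             score += 1
--
--         if node == START:
--             if score == 2:
--                 return 1
--             else:
--                 return 0
--
--         return sum(
--             [
--                 memoize((input_node, score), step, memo)
--                 for input_node in nodes[node]["inputs"]
--             ]
--         )
--
--     return memoize((END, 0), step, {})
-- ===== SOURCE B (Python) =====
-- def solution02(input_data):
--     START, END = "svr", "out"
--     SPECIAL = ("dac", "fft")
--
--     # forward adjacency; every edge endpoint becomes a key
--     outputs = {}
--     for a, outs in input_data.items():
--         for b in outs: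
--             outputs.setdefault(a, []).append(b)
--             outputs.setdefault(b, [])
--
--     n = len(outputs)
--     # level-synchronous walk counting: frontier maps (node, score) -> number of
--     # walks from START of the current length; counted walks never re-enter
--     # START (it is purely the source), so edges into START are not followed.
--     frontier = {(START, 1 if START in SPECIAL else 0): 1}
--     ans = 0
--     for _ in range(n + 1):
--         ans += frontier.get((END, 2), 0)
--         nxt = {}
--         for (node, s), c in frontier.items():
--             for b in outputs.get(node, []):
--                 if b == START:
--                     continue
--                 key = (b, s + (1 if b in SPECIAL else 0))
--                 nxt[key] = nxt.get(key, 0) + c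
--         frontier = nxt
--     return ans
-- ===== Notes on version B (the rewrite author's own statement) =====
-- stated objective: alternative
-- what changed: Replaces A's memoized backward recursion keyed by (node, score) from END with an iterative forward dynamic program: a level-synchronous frontier of (node, score) -> walk-count dicts is propagated from START along outgoing edges (never re-entering START, which A treats purely as the source) for n+1 rounds, accumulating the score-2 arrivals at END.
import Mathlib
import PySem

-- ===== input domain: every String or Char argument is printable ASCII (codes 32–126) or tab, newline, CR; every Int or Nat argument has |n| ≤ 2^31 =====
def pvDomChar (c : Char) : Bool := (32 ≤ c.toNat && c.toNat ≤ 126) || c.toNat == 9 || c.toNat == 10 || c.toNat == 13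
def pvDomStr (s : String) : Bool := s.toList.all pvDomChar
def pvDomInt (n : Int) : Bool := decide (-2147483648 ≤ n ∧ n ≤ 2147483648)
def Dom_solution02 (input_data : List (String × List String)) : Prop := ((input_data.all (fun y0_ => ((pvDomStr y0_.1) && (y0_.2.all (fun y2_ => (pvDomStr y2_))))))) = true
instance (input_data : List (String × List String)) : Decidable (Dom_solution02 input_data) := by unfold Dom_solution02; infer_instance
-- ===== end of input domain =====

-- B replaces A's memoized backward recursion over (node, score) keys by an iterative
-- level-synchronous forward walk count from the source node (objective: alternative algorithm).

-- the edge list of the graph, in the traversal order of `input_data.items()` (shared helper)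
def pvE (input_data : List (String × List String)) : List (String × String) :=
  (PySem.Dict.ofList input_data).items.flatMap (fun p => p.2.map (fun b => (p.1, b)))

-- every edge-endpoint name, with repetitions (used for A's fuel bound and for Pre_)
def pvNames (input_data : List (String × List String)) : List String :=
  (pvE input_data).flatMap (fun e => [e.1, e.2])

-- ===== PORT A =====
-- nodes = defaultdict(node_factory); for a, outputs in input_data.items(): for b in outputs: …
-- entry value = (inputs, outputs); defaultdict access-on-missing = getD with the default ([], [])
def pvNodesA (input_data : List (String × List String)) :
    PySem.Dict String (List String × List String) :=
  (PySem.Dict.ofList input_data).items.foldl (fun nd p =>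
    p.2.foldl (fun nd b =>
      let nd := nd.insert p.1 ((nd.getD p.1 ([], [])).1, (nd.getD p.1 ([], [])).2 ++ [b])
      nd.insert b ((nd.getD b ([], [])).1 ++ [p.1], (nd.getD b ([], [])).2)) nd)
    PySem.Dict.empty

-- memoize/step, with the memo dict threaded through (Python mutates it in place);
-- fuel is a termination device only: under Pre_ it is proved never to run out
mutual
def pvMemoA (fuel : Nat) (nd : PySem.Dict String (List String × List String))
    (k : String × Int) (memo : PySem.Dict (String × Int) Int) :
    Int × PySem.Dict (String × Int) Int :=
  match memo.get? k with
  | some v => (v, memo)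
  | none =>
    match fuel with
    | 0 => (0, memo)   -- unreachable under Pre_ (fuel exhaustion)
    | fuel' + 1 =>
      let r := pvStepA fuel' nd k memo
      let memo' := r.2.insert k r.1
      (memo'.getD k 0, memo')
  termination_by 2 * fuel
def pvStepA (fuel : Nat) (nd : PySem.Dict String (List String × List String))
    (k : String × Int) (memo : PySem.Dict (String × Int) Int) :
    Int × PySem.Dict (String × Int) Int :=
  let score := if k.1 = "dac" ∨ k.1 = "fft" then k.2 + 1 else k.2
  if k.1 = "svr" then ((if score = 2 then 1 else 0), memo)
  else
    ((nd.getD k.1 ([], [])).1).foldl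
      (fun acc u =>
        let r := pvMemoA fuel nd (u, score) acc.2
        (acc.1 + r.1, r.2))
      (0, memo)
  termination_by 2 * fuel + 1
end

def solution02 (input_data : List (String × List String)) : Int :=
  let nd := pvNodesA input_data
  (pvMemoA ((pvNames input_data).length + 2) nd ("out", 0) PySem.Dict.empty).1

-- ===== PORT B =====
-- outputs = {}; for a, outs in input_data.items(): for b in outs:
--   outputs.setdefault(a, []).append(b); outputs.setdefault(b, [])
def pvOutB (input_data : List (String × List String)) : PySem.Dict String (List String) :=
  (PySem.Dict.ofList input_data).items.foldl (fun d p =>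
    p.2.foldl (fun d b =>
      let d := d.insert p.1 (d.getD p.1 [] ++ [b])
      d.setdefault b []) d)
    PySem.Dict.empty

-- one round: scatter every frontier entry along the outgoing edges into nxt;
-- `if b == START: continue` = edges back into the source are not followed
def pvPush (out : PySem.Dict String (List String))
    (f : PySem.Dict (String × Int) Int) : PySem.Dict (String × Int) Int :=
  f.items.foldl (fun nxt p =>
    (out.getD p.1.1 []).foldl (fun nxt b =>
      if b = "svr" then nxt
      else
        let key : String × Int := (b, p.1.2 + (if b = "dac" ∨ b = "fft" then (1 : Int) else 0))
        nxt.insert key (nxt.getD key 0 + p.2)) nxt)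
    PySem.Dict.empty

def solution02_alt (input_data : List (String × List String)) : Int :=
  let out := pvOutB input_data
  let n := out.size
  let init : PySem.Dict (String × Int) Int :=
    PySem.Dict.empty.insert
      (("svr" : String), if ("svr" : String) = "dac" ∨ ("svr" : String) = "fft" then (1 : Int) else 0) 1
  ((List.range (n + 1)).foldl
    (fun st _ => (st.1 + st.2.getD (("out" : String), (2 : Int)) 0, pvPush out st.2))
    ((0 : Int), init)).1

-- ===== PRECONDITION & SPEC =====
-- the edges A's recursion can traverse: A stops at "svr", so edges into "svr" are never followed
def pvE' (input_data : List (String × List String)) : List (String × String) :=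
  (pvE input_data).filter (fun e => decide (¬ e.2 = "svr"))

-- one expansion step of forward reachability along an edge list
def pvSuccStep (E : List (String × String)) (S : Finset String) : Finset String :=
  S ∪ ((E.filter (fun e => decide (e.1 ∈ S))).map Prod.snd).toFinset

-- forward-reachable set of v along pvE' (saturated: the exponent exceeds the node count)
def pvReach (input_data : List (String × List String)) (v : String) : Finset String :=
  (pvSuccStep (pvE' input_data))^[(pvNames input_data).length] {v}

-- Pre_ excludes exactly the inputs on which A raises RecursionError: a directed cycle that
-- avoids "svr" and can reach "out" (A's backward recursion from "out" never terminates there).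
def Pre_solution02 (input_data : List (String × List String)) : Prop :=
  ∀ e ∈ pvE' input_data, "out" ∈ pvReach input_data e.1 → e.1 ∉ pvReach input_data e.2

instance (input_data : List (String × List String)) : Decidable (Pre_solution02 input_data) := by
  unfold Pre_solution02; infer_instance

def pvWitness_solution02 : (List (String × List String)) :=
  [("svr", ["dac", "out"]), ("dac", ["fft"]), ("fft", ["out"])]

def Spec_solution02 (input_data : List (String × List String)) (out : Int) : Prop :=
  out = solution02_alt input_data
instance (input_data : List (String × List String)) (out : Int) : Decidable (Spec_solution02 input_data out) := by
  unfold Spec_solution02; infer_instance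

-- ===== CLAIM (what is proved, stated in full; the proofs are below) =====
def Claim_equal_solution02 : Prop := ∀ (input_data : List (String × List String)), Dom_solution02 input_data → Pre_solution02 input_data → Spec_solution02 input_data (solution02 input_data)

-- ===== LEMMAS AND PROOFS =====

-- v is a node A's recursion visits: "out" is reachable from v without re-entering "svr"
def pvReg (input_data : List (String × List String)) (v : String) : Prop :=
  "out" ∈ pvReach input_data v


-- score bump of a node ("dac"/"fft" are special)
def pvDelta (v : String) : Int := if v = "dac" ∨ v = "fft" then 1 else 0

-- input nodes of v, one entry per edge, in edge order (full edge list: A's nodes dict)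
def pvIn (input_data : List (String × List String)) (v : String) : List String :=
  ((pvE input_data).filter (fun e => e.2 = v)).map Prod.fst

-- input nodes of v along the traversable edges pvE'
def pvIn' (input_data : List (String × List String)) (v : String) : List String :=
  ((pvE' input_data).filter (fun e => e.2 = v)).map Prod.fst

-- number of walks svr ⇝ v of length t (never re-entering svr) collecting score s
def pvC (input_data : List (String × List String)) : Nat → String → Int → Int
  | 0, v, s => if v = "svr" ∧ s = pvDelta "svr" then 1 else 0
  | t+1, v, s => ((pvIn' input_data v).map (fun u => pvC input_data t u (s - pvDelta v))).sum

def pvNB (input_data : List (String × List String)) : Nat := (pvOutB input_data).size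

-- the common value: A's memo value at (n, s) and B's accumulated table entry
def pvT (input_data : List (String × List String)) (n : String) (s : Int) : Int :=
  ((List.range (pvNB input_data + 1)).map (fun t => pvC input_data t n (2 - s))).sum

-- traversable-edge relation and chains
def pvR (input_data : List (String × List String)) (u v : String) : Prop :=
  (u, v) ∈ pvE' input_data

-- ---------- generic sum helpers ----------
theorem pvSum_map_add {α : Type} (l : List α) (f g : α → Int) :
    (l.map (fun x => f x + g x)).sum = (l.map f).sum + (l.map g).sum := by
  induction l with
  | nil => simp
  | cons a t ih => simp [ih]; ring

theorem pvSum_swap {α β : Type} (l : List α) (m : List β) (F : α → β → Int) :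
    (l.map (fun x => (m.map (fun y => F x y)).sum)).sum
      = (m.map (fun y => (l.map (fun x => F x y)).sum)).sum := by
  induction l with
  | nil => simp [List.map_const']
  | cons a t ih => simp only [List.map_cons, List.sum_cons, ih, ← pvSum_map_add]

theorem pvSum_filter {α : Type} (l : List α) (p : α → Bool) (f : α → Int) :
    ((l.filter p).map f).sum = (l.map (fun x => if p x then f x else 0)).sum := by
  induction l with
  | nil => simp
  | cons a t ih => by_cases h : p a <;> simp [List.filter_cons, h, ih]

theorem pvSum_exists_ne_zero {α : Type} (l : List α) (f : α → Int)
    (h : (l.map f).sum ≠ 0) : ∃ x ∈ l, f x ≠ 0 := by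
  by_contra hc
  push_neg at hc
  apply h
  apply List.sum_eq_zero
  intro y hy
  obtain ⟨x, hx, rfl⟩ := List.mem_map.1 hy
  exact hc x hx

theorem pvSum_congr {α : Type} (l : List α) (f g : α → Int)
    (h : ∀ x ∈ l, f x = g x) : (l.map f).sum = (l.map g).sum := by
  rw [List.map_congr_left h]

-- ---------- double loop over items = fold over the edge list ----------
theorem pvFoldFlat {σ : Type} (items : List (String × List String))
    (f : σ → String × String → σ) (init : σ) :
    items.foldl (fun s p => p.2.foldl (fun s b => f s (p.1, b)) s) init
      = (items.flatMap (fun p => p.2.map (fun b => (p.1, b)))).foldl f init := by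
  induction items generalizing init with
  | nil => rfl
  | cons p t ih => simp [List.foldl_append, List.foldl_map, ih]

-- per-edge update of A's nodes dict
def pvEStepA (nd : PySem.Dict String (List String × List String)) (e : String × String) :
    PySem.Dict String (List String × List String) :=
  let nd := nd.insert e.1 ((nd.getD e.1 ([], [])).1, (nd.getD e.1 ([], [])).2 ++ [e.2])
  nd.insert e.2 ((nd.getD e.2 ([], [])).1 ++ [e.1], (nd.getD e.2 ([], [])).2)

theorem pvNodesA_eq (d : List (String × List String)) :
    pvNodesA d = (pvE d).foldl pvEStepA PySem.Dict.empty := by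
  unfold pvNodesA pvE
  exact pvFoldFlat _ pvEStepA _

theorem pvEStepA_getD_fst (nd : PySem.Dict String (List String × List String))
    (e : String × String) (v : String) :
    ((pvEStepA nd e).getD v ([], [])).1
      = (nd.getD v ([], [])).1 ++ (if e.2 = v then [e.1] else []) := by
  simp only [pvEStepA, PySem.Dict.getD_insert]
  split_ifs with h1 h2 h3 <;> simp_all

theorem pvInA_aux (E : List (String × String)) (v : String) :
    ∀ nd, ((E.foldl pvEStepA nd).getD v ([], [])).1
      = (nd.getD v ([], [])).1 ++ ((E.filter (fun e => e.2 = v)).map Prod.fst) := by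
  induction E with
  | nil => simp
  | cons e t ih =>
    intro nd
    simp only [List.foldl_cons, ih, pvEStepA_getD_fst, List.filter_cons]
    by_cases h : e.2 = v <;> simp [h]

theorem pvInA (d : List (String × List String)) (v : String) :
    ((pvNodesA d).getD v ([], [])).1 = pvIn d v := by
  rw [pvNodesA_eq, pvIn]
  simpa using pvInA_aux (pvE d) v PySem.Dict.empty

-- per-edge update of B's outputs dict
def pvEStepB (d : PySem.Dict String (List String)) (e : String × String) :
    PySem.Dict String (List String) :=
  let d := d.insert e.1 (d.getD e.1 [] ++ [e.2])
  d.setdefault e.2 []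

theorem pvOutB_eq (d : List (String × List String)) :
    pvOutB d = (pvE d).foldl pvEStepB PySem.Dict.empty := by
  unfold pvOutB pvE
  exact pvFoldFlat _ pvEStepB _

theorem pvEStepB_getD (d : PySem.Dict String (List String)) (e : String × String) (v : String) :
    (pvEStepB d e).getD v [] = d.getD v [] ++ (if e.1 = v then [e.2] else []) := by
  unfold pvEStepB
  by_cases hc : (d.insert e.1 (d.getD e.1 [] ++ [e.2])).contains e.2
  · rw [PySem.Dict.setdefault_of_contains (h := hc)]
    simp only [PySem.Dict.getD_insert]
    by_cases h1 : v = e.1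
    · subst h1; simp
    · rw [if_neg h1]
      have h1' : ¬ e.1 = v := fun h => h1 h.symm
      simp [h1']
  · have hcc := hc
    rw [PySem.Dict.contains_insert] at hcc
    simp only [Bool.or_eq_true, beq_iff_eq, not_or, Bool.not_eq_true] at hcc
    obtain ⟨hne21, hnc⟩ := hcc
    rw [PySem.Dict.setdefault_of_not_contains (h := by simpa using hc)]
    simp only [PySem.Dict.getD_insert]
    by_cases h1 : v = e.2
    · rw [if_pos h1]
      have hd : d.getD v [] = [] := by
        rw [h1]; exact PySem.Dict.getD_of_not_contains d [] hnc
      have hne : ¬ e.1 = v := fun h => hne21 (h.trans h1).symm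
      simp [hd, hne]
    · rw [if_neg h1]
      by_cases h2 : v = e.1
      · subst h2; simp
      · have h2' : ¬ e.1 = v := fun h => h2 h.symm
        simp [h2, h2']

theorem pvEStepB_mem_keys (d : PySem.Dict String (List String)) (e : String × String) (x : String) :
    x ∈ (pvEStepB d e).keys ↔ x ∈ d.keys ∨ x = e.1 ∨ x = e.2 := by
  unfold pvEStepB
  by_cases hc : (d.insert e.1 (d.getD e.1 [] ++ [e.2])).contains e.2
  · rw [PySem.Dict.setdefault_of_contains (h := hc)]
    have := (PySem.Dict.contains_iff_mem_keys _ _).1 hc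
    rw [PySem.Dict.mem_keys_insert] at this ⊢
    constructor
    · rintro (h | h) <;> tauto
    · rintro (h | h | h)
      · tauto
      · tauto
      · subst h
        rcases this with h | h <;> tauto
  · rw [PySem.Dict.setdefault_of_not_contains (h := by simpa using hc)]
    rw [PySem.Dict.mem_keys_insert, PySem.Dict.mem_keys_insert]
    tauto

theorem pvOutB_getD_aux (E : List (String × String)) (v : String) :
    ∀ d, ((E.foldl pvEStepB d).getD v [])
      = d.getD v [] ++ ((E.filter (fun e => e.1 = v)).map Prod.snd) := by
  induction E with
  | nil => simp
  | cons e t ih =>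
    intro d
    simp only [List.foldl_cons, ih, pvEStepB_getD, List.filter_cons]
    by_cases h : e.1 = v <;> simp [h]

theorem pvOutB_getD (d : List (String × List String)) (v : String) :
    (pvOutB d).getD v [] = ((pvE d).filter (fun e => e.1 = v)).map Prod.snd := by
  rw [pvOutB_eq]
  simpa using pvOutB_getD_aux (pvE d) v PySem.Dict.empty

theorem pvOutB_keys_aux (E : List (String × String)) (x : String) :
    ∀ d, x ∈ (E.foldl pvEStepB d).keys ↔ x ∈ d.keys ∨ ∃ e ∈ E, x = e.1 ∨ x = e.2 := by
  induction E with
  | nil => simp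
  | cons e t ih =>
    intro d
    rw [List.foldl_cons, ih, pvEStepB_mem_keys]
    constructor
    · rintro ((h | h | h) | ⟨e', he', h⟩)
      · exact Or.inl h
      · exact Or.inr ⟨e, List.mem_cons_self, Or.inl h⟩
      · exact Or.inr ⟨e, List.mem_cons_self, Or.inr h⟩
      · exact Or.inr ⟨e', List.mem_cons_of_mem _ he', h⟩
    · rintro (h | ⟨e', he', h⟩)
      · exact Or.inl (Or.inl h)
      · rcases List.mem_cons.1 he' with rfl | he'
        · exact Or.inl (Or.inr h)
        · exact Or.inr ⟨e', he', h⟩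

theorem pvOutB_mem_keys (d : List (String × List String)) (x : String) :
    x ∈ (pvOutB d).keys ↔ x ∈ pvNames d := by
  rw [pvOutB_eq, pvNames]
  have := pvOutB_keys_aux (pvE d) x PySem.Dict.empty
  simp only [PySem.Dict.keys_empty] at this
  simp only [this, List.mem_flatMap, List.mem_cons]
  constructor
  · rintro (h | ⟨e, he, h⟩)
    · simp at h
    · exact ⟨e, he, by tauto⟩
  · rintro ⟨e, he, h⟩
    refine Or.inr ⟨e, he, ?_⟩
    simpa using h

theorem pvNB_eq (d : List (String × List String)) : pvNB d = (pvOutB d).keys.length := by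
  simp [pvNB, PySem.Dict.size, PySem.Dict.keys]

-- ---------- reachability: monotonicity, saturation, closure ----------
theorem pvSuccStep_infl (E : List (String × String)) (S : Finset String) :
    S ⊆ pvSuccStep E S := Finset.subset_union_left

theorem pvSuccStep_mono (E : List (String × String)) {S T : Finset String} (h : S ⊆ T) :
    pvSuccStep E S ⊆ pvSuccStep E T := by
  unfold pvSuccStep
  intro x hx
  rcases Finset.mem_union.1 hx with hx | hx
  · exact Finset.mem_union.2 (Or.inl (h hx))
  · refine Finset.mem_union.2 (Or.inr ?_)
    simp only [List.mem_toFinset, List.mem_map, List.mem_filter, decide_eq_true_eq] at hx ⊢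
    obtain ⟨e, ⟨he, hm⟩, hx⟩ := hx
    exact ⟨e, ⟨he, h hm⟩, hx⟩

theorem pvIter_mono_set (E : List (String × String)) (k : Nat) {S T : Finset String}
    (h : S ⊆ T) : (pvSuccStep E)^[k] S ⊆ (pvSuccStep E)^[k] T := by
  induction k generalizing S T with
  | zero => exact h
  | succ k ih =>
    rw [Function.iterate_succ_apply, Function.iterate_succ_apply]
    exact ih (pvSuccStep_mono E h)

theorem pvIter_mono_count (E : List (String × String)) {i j : Nat} (h : i ≤ j)
    (S : Finset String) : (pvSuccStep E)^[i] S ⊆ (pvSuccStep E)^[j] S := by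
  obtain ⟨k, rfl⟩ := Nat.exists_eq_add_of_le h
  clear h
  induction k with
  | zero => simp
  | succ k ih =>
    have : (pvSuccStep E)^[i + k] S ⊆ (pvSuccStep E)^[i + (k + 1)] S := by
      rw [← Nat.add_assoc, Function.iterate_succ_apply']
      exact pvSuccStep_infl E _
    exact ih.trans this

theorem pvSuccStep_edge (E : List (String × String)) (S : Finset String)
    (e : String × String) (he : e ∈ E) (h : e.1 ∈ S) : e.2 ∈ pvSuccStep E S := by
  unfold pvSuccStep
  refine Finset.mem_union.2 (Or.inr ?_)
  simp only [List.mem_toFinset, List.mem_map, List.mem_filter, decide_eq_true_eq]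
  exact ⟨e, ⟨he, h⟩, rfl⟩

theorem pvIterSubU (E : List (String × String)) (S : Finset String) :
    ∀ k, (pvSuccStep E)^[k] S ⊆ S ∪ (E.map Prod.snd).toFinset := by
  intro k
  induction k with
  | zero => simp
  | succ k ih =>
    rw [Function.iterate_succ_apply']
    intro x hx
    rcases Finset.mem_union.1 hx with hx | hx
    · exact ih hx
    · refine Finset.mem_union.2 (Or.inr ?_)
      simp only [List.mem_toFinset, List.mem_map, List.mem_filter] at hx ⊢
      obtain ⟨e, ⟨he, _⟩, hx⟩ := hx
      exact ⟨e, he, hx⟩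

theorem pvGrow (E : List (String × String)) (S : Finset String) :
    ∀ k, (∀ j, j < k → (pvSuccStep E)^[j] S ≠ (pvSuccStep E)^[j+1] S) →
      S.card + k ≤ ((pvSuccStep E)^[k] S).card := by
  intro k
  induction k with
  | zero => intro _; simp
  | succ k ih =>
    intro h
    have h1 := ih (fun j hj => h j (Nat.lt_succ_of_lt hj))
    have hsub : (pvSuccStep E)^[k] S ⊆ (pvSuccStep E)^[k+1] S := by
      rw [Function.iterate_succ_apply']
      exact pvSuccStep_infl E _
    have hlt : ((pvSuccStep E)^[k] S).card < ((pvSuccStep E)^[k+1] S).card :=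
      Finset.card_lt_card (Finset.ssubset_iff_subset_ne.2 ⟨hsub, h k (Nat.lt_succ_self k)⟩)
    omega

theorem pvFixFwd (E : List (String × String)) (S : Finset String) (k : Nat)
    (h : (pvSuccStep E)^[k+1] S = (pvSuccStep E)^[k] S) :
    ∀ j, (pvSuccStep E)^[k + j] S = (pvSuccStep E)^[k] S := by
  intro j
  induction j with
  | zero => rfl
  | succ j ih =>
    have h' : pvSuccStep E ((pvSuccStep E)^[k] S) = (pvSuccStep E)^[k] S :=
      (Function.iterate_succ_apply' (pvSuccStep E) k S).symm.trans h
    have hs : k + (j + 1) = (k + j) + 1 := rfl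
    rw [hs, Function.iterate_succ_apply', ih]
    exact h'

theorem pvStab (E : List (String × String)) (S : Finset String) (hS : S.Nonempty) (N : Nat)
    (hN : (S ∪ (E.map Prod.snd).toFinset).card ≤ N) :
    (pvSuccStep E)^[N+1] S = (pvSuccStep E)^[N] S := by
  by_cases hall : ∀ j, j < N → (pvSuccStep E)^[j] S ≠ (pvSuccStep E)^[j+1] S
  · exfalso
    have h1 := pvGrow E S N hall
    have h2 : ((pvSuccStep E)^[N] S).card ≤ N :=
      le_trans (Finset.card_le_card (pvIterSubU E S N)) hN
    have h3 : 1 ≤ S.card := Finset.card_pos.2 hS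
    omega
  · push_neg at hall
    obtain ⟨j, hj, heq⟩ := hall
    have hfix := pvFixFwd E S j heq.symm
    have e1 := hfix (N + 1 - j)
    have e2 := hfix (N - j)
    rw [show j + (N + 1 - j) = N + 1 by omega] at e1
    rw [show j + (N - j) = N by omega] at e2
    rw [e1, e2]

theorem pvNames_len_aux (l : List (String × String)) :
    (l.flatMap (fun e => [e.1, e.2])).length = 2 * l.length := by
  induction l with
  | nil => simp
  | cons a t ih => simp [ih]; omega

theorem pvNames_len (d : List (String × List String)) :
    (pvNames d).length = 2 * (pvE d).length := pvNames_len_aux (pvE d)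

-- visited nodes are closed backward along traversable edges
theorem pvRegStep (d : List (String × List String)) (u v : String)
    (hedge : (u, v) ∈ pvE' d) (hv : pvReg d v) : pvReg d u := by
  have hE : (u, v) ∈ pvE d := (List.mem_filter.1 hedge).1
  have hpos : 1 ≤ (pvE d).length := by
    cases h : pvE d with
    | nil => rw [h] at hE; cases hE
    | cons a t => simp
  have hcard : (({u} : Finset String) ∪ ((pvE' d).map Prod.snd).toFinset).card
      ≤ (pvNames d).length := by
    have h1 := Finset.card_union_le ({u} : Finset String) ((pvE' d).map Prod.snd).toFinset
    have h2 : (((pvE' d).map Prod.snd).toFinset).card ≤ ((pvE' d).map Prod.snd).length :=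
      List.toFinset_card_le _
    have h3 : ((pvE' d).map Prod.snd).length = (pvE' d).length := List.length_map ..
    have h4 : (pvE' d).length ≤ (pvE d).length := List.length_filter_le _ _
    have h5 := pvNames_len d
    have h6 : ({u} : Finset String).card = 1 := Finset.card_singleton u
    omega
  have hstab := pvStab (pvE' d) {u} (Finset.singleton_nonempty u) ((pvNames d).length) hcard
  unfold pvReg pvReach at hv ⊢
  have h5 : ({v} : Finset String) ⊆ pvSuccStep (pvE' d) {u} :=
    Finset.singleton_subset_iff.2 (pvSuccStep_edge _ _ (u, v) hedge (Finset.mem_singleton_self u))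
  have h6 := (pvIter_mono_set (pvE' d) ((pvNames d).length) h5) hv
  rw [← Function.iterate_succ_apply] at h6
  rw [← hstab]
  exact h6

theorem pvReg_out (d : List (String × List String)) : pvReg d "out" := by
  unfold pvReg pvReach
  exact pvIter_mono_count (pvE' d) (Nat.zero_le _) {"out"} (by simp)

-- ---------- chains and acyclicity on the visited region ----------
theorem pvNodupLen (l m : List String) (h : l.Nodup) (hs : ∀ x ∈ l, x ∈ m) :
    l.length ≤ m.length := by
  calc l.length = l.toFinset.card := (List.toFinset_card_of_nodup h).symm
    _ ≤ m.toFinset.card := Finset.card_le_card (fun x hx => by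
        simp only [List.mem_toFinset] at *; exact hs x hx)
    _ ≤ m.length := m.toFinset_card_le

-- the last element of a chain starting at x is reachable from x in length-1 steps
theorem pvChainReach (d : List (String × List String)) :
    ∀ l : List String, List.IsChain (pvR d) l → ∀ x z, l.head? = some x → l.getLast? = some z →
      z ∈ (pvSuccStep (pvE' d))^[l.length - 1] {x} := by
  intro l
  induction l with
  | nil => intro _ x z h; simp at h
  | cons a t ih =>
    intro hc x z hx hz
    simp only [List.head?_cons, Option.some_inj] at hx
    subst hx
    cases t with
    | nil =>
      simp only [List.getLast?_singleton, Option.some_inj] at hz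
      subst hz; simp
    | cons b t' =>
      rw [List.isChain_cons_cons] at hc
      have hrec := ih hc.2 b z rfl (by simpa using hz)
      have h1 : ({b} : Finset String) ⊆ pvSuccStep (pvE' d) {a} := by
        intro yy hyy
        rw [Finset.mem_singleton] at hyy
        rw [hyy]
        exact pvSuccStep_edge _ _ (a, b) hc.1 (by simp)
      have h2 := (pvIter_mono_set (pvE' d) ((b :: t').length - 1) h1) hrec
      rw [← Function.iterate_succ_apply] at h2
      simpa using h2

theorem pvChainMem (d : List (String × List String)) :
    ∀ l : List String, List.IsChain (pvR d) l → 2 ≤ l.length → ∀ x ∈ l, x ∈ pvNames d := by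
  intro l
  induction l with
  | nil => simp
  | cons a t ih =>
    intro hc hlen x hx
    cases t with
    | nil => simp at hlen
    | cons b t' =>
      rw [List.isChain_cons_cons] at hc
      have hedge : (a, b) ∈ pvE d := (List.mem_filter.1 hc.1).1
      have hmem : ∀ y : String, (y = a ∨ y = b) → y ∈ pvNames d := by
        intro y hy
        unfold pvNames
        refine List.mem_flatMap.2 ⟨(a, b), hedge, ?_⟩
        rcases hy with h | h <;> simp [h]
      rcases List.mem_cons.1 hx with rfl | hx
      · exact hmem x (Or.inl rfl)
      · cases t' with
        | nil => exact hmem x (Or.inr (by simpa using hx))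
        | cons c t'' => exact ih hc.2 (by simp) x hx

-- every element of a chain whose last element is visited is visited
theorem pvChainRegAll (d : List (String × List String)) :
    ∀ l : List String, List.IsChain (pvR d) l → ∀ w, l.getLast? = some w → pvReg d w →
      ∀ x ∈ l, pvReg d x := by
  intro l
  induction l with
  | nil => simp
  | cons a t ih =>
    intro hc w hw hreg x hx
    cases t with
    | nil =>
      simp only [List.getLast?_singleton, Option.some_inj] at hw
      subst hw
      rcases List.mem_cons.1 hx with rfl | hx
      · exact hreg
      · cases hx
    | cons b t' =>
      rw [List.isChain_cons_cons] at hc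
      have htail := ih hc.2 w (by simpa using hw) hreg
      rcases List.mem_cons.1 hx with rfl | hx
      · exact pvRegStep d x b hc.1 (htail b List.mem_cons_self)
      · exact htail x hx

-- under Pre_ every chain of visited nodes is duplicate-free
theorem pvChainNodup (d : List (String × List String)) (hpre : Pre_solution02 d) :
    ∀ n (l : List String), l.length ≤ n → List.IsChain (pvR d) l →
      (∀ x ∈ l, pvReg d x) → l.Nodup := by
  intro n
  induction n with
  | zero =>
    intro l hl _ _
    rw [Nat.le_zero, List.length_eq_zero_iff] at hl
    subst hl; simp
  | succ n ih =>
    intro l hl hc hall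
    match l with
    | [] => simp
    | x :: l' =>
      have hl' : l'.Nodup :=
        ih l' (by simpa using Nat.lt_succ_iff.1 (Nat.lt_of_lt_of_le (by simp) hl)) hc.tail
          (fun y hy => hall y (List.mem_cons_of_mem _ hy))
      by_cases hx : x ∈ l'
      · exfalso
        -- build the closed chain x :: (take (i+1) l') = (x :: m) ++ [x]
        have hi : l'.idxOf x < l'.length := List.idxOf_lt_length_of_mem hx
        set i := l'.idxOf x with hidef
        set m := l'.take i with hmdef
        have htake : l'.take (i + 1) = m ++ [x] := by
          rw [List.take_add_one, hmdef, List.getElem?_eq_getElem hi, List.getElem_idxOf]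
          rfl
        have hcc : List.IsChain (pvR d) ((x :: m) ++ [x]) := by
          have : (x :: m) ++ [x] = (x :: l').take (i + 2) := by
            simp only [List.take_succ_cons, htake, hmdef]
            rfl
          rw [this]
          exact hc.take _
        rw [List.isChain_append] at hcc
        obtain ⟨hq, -, hlast⟩ := hcc
        obtain ⟨z, hz⟩ : ∃ z, (x :: m).getLast? = some z := ⟨_, List.getLast?_eq_getLast (by simp)⟩
        have hedge : pvR d z x := hlast z hz x rfl
        have hreach : z ∈ (pvSuccStep (pvE' d))^[(x :: m).length - 1] {x} :=
          pvChainReach d (x :: m) hq x z rfl hz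
        have hzmem : z ∈ x :: m := by
          obtain ⟨ys, hys⟩ := List.getLast?_eq_some_iff.1 hz
          rw [hys]
          simp
        have hzreg : pvReg d z := by
          rcases List.mem_cons.1 hzmem with rfl | hzm
          · exact hall z List.mem_cons_self
          · exact hall z (List.mem_cons_of_mem _ (List.take_subset _ _ (hmdef ▸ hzm)))
        have hxm : x ∉ m := by
          rw [hmdef]
          intro hmem
          have := (List.mem_take_iff_idxOf_lt hx).1 hmem
          omega
        have hmn : m.Nodup := List.Nodup.sublist (by rw [hmdef]; exact List.take_sublist _ _) hl'
        have hbound : (x :: m).length - 1 ≤ (pvNames d).length := by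
          match m, hq, hxm, hmn with
          | [], _, _, _ => simp
          | y :: m', hq, hxm, hmn =>
            have hnd : (x :: y :: m').Nodup := List.nodup_cons.2 ⟨hxm, hmn⟩
            have hsub := pvChainMem d (x :: y :: m') hq (by simp)
            have := pvNodupLen (x :: y :: m') (pvNames d) hnd hsub
            simp only [List.length_cons] at this ⊢
            omega
        have := hpre (z, x) hedge hzreg
        exact this (pvIter_mono_count (pvE' d) hbound {x} hreach)
      · exact List.nodup_cons.2 ⟨hx, hl'⟩

-- ---------- walk counts: characterization and vanishing ----------
theorem pvIn'_mem (d : List (String × List String)) (u v : String) :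
    u ∈ pvIn' d v ↔ (u, v) ∈ pvE' d := by
  unfold pvIn'
  simp only [List.mem_map, List.mem_filter, decide_eq_true_eq]
  constructor
  · rintro ⟨e, ⟨he, h2⟩, h1⟩
    have : e = (u, v) := by
      cases e; simp only [Prod.mk.injEq]; exact ⟨h1, h2⟩
    rwa [this] at he
  · intro h
    exact ⟨(u, v), ⟨h, rfl⟩, rfl⟩

theorem pvIn'_eq (d : List (String × List String)) (v : String) (hv : ¬ v = "svr") :
    pvIn' d v = pvIn d v := by
  unfold pvIn' pvIn pvE'
  rw [List.filter_filter]
  congr 1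
  apply List.filter_congr
  intro e _
  by_cases h : e.2 = v
  · simp [h, hv]
  · simp [h]

theorem pvIn'_svr (d : List (String × List String)) : pvIn' d "svr" = [] := by
  unfold pvIn' pvE'
  rw [List.filter_filter]
  have : ∀ e ∈ pvE d, ¬ ((decide (e.2 = "svr")) && (decide (¬ e.2 = "svr"))) = true := by
    intro e _
    by_cases h : e.2 = "svr" <;> simp [h]
  rw [List.filter_eq_nil_iff.2 (fun e he => this e he)]
  simp

theorem pvCWalk (d : List (String × List String)) :
    ∀ t v s, pvC d t v s ≠ 0 →
      ∃ l : List String, List.IsChain (pvR d) l ∧ l.head? = some "svr" ∧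
        l.getLast? = some v ∧ l.length = t + 1 := by
  intro t
  induction t with
  | zero =>
    intro v s h
    unfold pvC at h
    by_cases hv : v = "svr" ∧ s = pvDelta "svr"
    · exact ⟨["svr"], by simp, rfl, by simp [hv.1], rfl⟩
    · simp [hv] at h
  | succ t ih =>
    intro v s h
    unfold pvC at h
    obtain ⟨u, hu, hne⟩ := pvSum_exists_ne_zero _ _ h
    obtain ⟨l, hlc, hlh, hll, hlen⟩ := ih u _ hne
    have hedge : (u, v) ∈ pvE' d := (pvIn'_mem d u v).1 hu
    refine ⟨l ++ [v], ?_, ?_, ?_, ?_⟩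
    · rw [List.isChain_append]
      refine ⟨hlc, by simp, ?_⟩
      intro x hx y hy
      have hxu : x = u := by
        rw [Option.mem_def, hll] at hx
        exact (Option.some_inj.1 hx).symm
      have hyv : y = v := by
        simp only [List.head?_cons, Option.mem_def, Option.some_inj] at hy
        exact hy.symm
      rw [hxu, hyv]
      exact hedge
    · rcases l with _ | ⟨a, l'⟩
      · simp at hlen
      · simpa using hlh
    · simp
    · simp [hlen]

theorem pvCNB (d : List (String × List String)) (hpre : Pre_solution02 d)
    (u n : String) (hedge : (u, n) ∈ pvE' d) (hregu : pvReg d u) (s : Int) :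
    pvC d (pvNB d) u s = 0 := by
  have hE : (u, n) ∈ pvE d := (List.mem_filter.1 hedge).1
  have humem : u ∈ pvNames d := by
    unfold pvNames
    exact List.mem_flatMap.2 ⟨(u, n), hE, by simp⟩
  have hkeys : u ∈ (pvOutB d).keys := (pvOutB_mem_keys d u).2 humem
  have hNB : 1 ≤ pvNB d := by
    rw [pvNB_eq]
    cases hk : (pvOutB d).keys
    · rw [hk] at hkeys; simp at hkeys
    · simp
  by_contra h
  obtain ⟨l, hlc, hlh, hll, hlen⟩ := pvCWalk d (pvNB d) u s h
  have hall := pvChainRegAll d l hlc u hll hregu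
  have hnd := pvChainNodup d hpre l.length l (le_refl _) hlc hall
  have hsub : ∀ x ∈ l, x ∈ (pvOutB d).keys := by
    intro x hx
    exact (pvOutB_mem_keys d x).2 (pvChainMem d l hlc (by omega) x hx)
  have := pvNodupLen l (pvOutB d).keys hnd hsub
  rw [hlen, ← pvNB_eq] at this
  omega

-- ---------- the recurrence satisfied by pvT ----------
theorem pvT_base (d : List (String × List String)) (s : Int) :
    pvT d "svr" s = if s = 2 then (1 : Int) else 0 := by
  unfold pvT
  rw [List.range_succ_eq_map]
  simp only [List.map_cons, List.map_map, List.sum_cons]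
  have h0 : ∀ t ∈ List.range (pvNB d), ((fun t => pvC d t "svr" (2 - s)) ∘ Nat.succ) t = 0 := by
    intro t _
    show pvC d (t + 1) "svr" (2 - s) = 0
    unfold pvC
    rw [pvIn'_svr]
    simp
  rw [List.map_congr_left h0]
  have : pvC d 0 "svr" (2 - s) = if s = 2 then (1 : Int) else 0 := by
    unfold pvC
    have hd : pvDelta "svr" = 0 := by decide
    rw [hd]
    by_cases hs : s = 2
    · simp [hs]
    · have : ¬ (2 - s = 0) := by omega
      simp [hs, this]
  rw [this]
  simp [List.map_const']

theorem pvT_rec (d : List (String × List String)) (hpre : Pre_solution02 d)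
    (n : String) (hn : n ≠ "svr") (hreg : pvReg d n) (s : Int) :
    pvT d n s = ((pvIn' d n).map (fun u => pvT d u (s + pvDelta n))).sum := by
  calc pvT d n s
      = ((List.range (pvNB d)).map (fun t => pvC d (t + 1) n (2 - s))).sum := by
        unfold pvT
        rw [List.range_succ_eq_map]
        simp only [List.map_cons, List.map_map, List.sum_cons]
        have h00 : pvC d 0 n (2 - s) = 0 := by
          unfold pvC
          simp [hn]
        rw [h00, zero_add]
        rfl
    _ = ((List.range (pvNB d)).map
          (fun t => ((pvIn' d n).map (fun u => pvC d t u (2 - s - pvDelta n))).sum)).sum := by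
        apply pvSum_congr
        intro t _
        simp [pvC]
    _ = ((pvIn' d n).map
          (fun u => ((List.range (pvNB d)).map (fun t => pvC d t u (2 - s - pvDelta n))).sum)).sum :=
        pvSum_swap _ _ _
    _ = ((pvIn' d n).map (fun u => pvT d u (s + pvDelta n))).sum := by
        apply pvSum_congr
        intro u hu
        unfold pvT
        rw [List.range_succ]
        simp only [List.map_append, List.sum_append, List.map_cons, List.map_nil,
          List.sum_cons, List.sum_nil]
        have hedge : (u, n) ∈ pvE' d := (pvIn'_mem d u n).1 hu
        rw [pvCNB d hpre u n hedge (pvRegStep d u n hedge hreg)]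
        have harg : 2 - (s + pvDelta n) = 2 - s - pvDelta n := by ring
        rw [harg]
        simp

-- ---------- A's memoized recursion computes pvT ----------
def pvOk (d : List (String × List String)) (memo : PySem.Dict (String × Int) Int) : Prop :=
  ∀ (n : String) (s v : Int), memo.get? (n, s) = some v → v = pvT d n s

def pvHC (d : List (String × List String)) (fuel : Nat) (n : String) : Prop :=
  ∀ l : List String, List.IsChain (pvR d) l → l ≠ [] → l.getLast? = some n → l.length ≤ fuel

theorem pvHC_zero (d : List (String × List String)) (n : String) : ¬ pvHC d 0 n := by
  intro h
  have := h [n] (by simp) (by simp) (by simp)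
  simp at this

theorem pvHC_child (d : List (String × List String)) (fuel : Nat) (n u : String)
    (h : pvHC d (fuel + 1) n) (hedge : (u, n) ∈ pvE' d) : pvHC d fuel u := by
  intro l hc hne hlast
  have hcc : List.IsChain (pvR d) (l ++ [n]) := by
    rw [List.isChain_append]
    refine ⟨hc, by simp, ?_⟩
    intro x hx y hy
    have hxu : x = u := by
      rw [Option.mem_def, hlast] at hx
      exact (Option.some_inj.1 hx).symm
    have hyn : y = n := by
      simp only [List.head?_cons, Option.mem_def, Option.some_inj] at hy
      exact hy.symm
    rw [hxu, hyn]
    exact hedge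
  have := h (l ++ [n]) hcc (by simp) (by simp)
  simp only [List.length_append, List.length_cons, List.length_nil] at this
  omega

theorem pvOk_insert (d : List (String × List String)) (memo : PySem.Dict (String × Int) Int)
    (hok : pvOk d memo) (n : String) (s : Int) :
    pvOk d (memo.insert (n, s) (pvT d n s)) := by
  intro n' s' v' h
  rw [PySem.Dict.get?_insert] at h
  split at h
  · rename_i heq
    have h1 : n' = n ∧ s' = s := by
      constructor
      · exact congrArg Prod.fst heq
      · exact congrArg Prod.snd heq
    rw [h1.1, h1.2]
    exact (Option.some_inj.1 h).symm
  · exact hok n' s' v' h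

theorem pvFoldA_spec (d : List (String × List String))
    (nd : PySem.Dict String (List String × List String)) (fuel : Nat)
    (IH : ∀ (n : String) (s : Int) memo, pvOk d memo → pvHC d fuel n → pvReg d n →
      (pvMemoA fuel nd (n, s) memo).1 = pvT d n s ∧
        pvOk d (pvMemoA fuel nd (n, s) memo).2) :
    ∀ (us : List String) (s : Int), (∀ u ∈ us, pvHC d fuel u ∧ pvReg d u) →
      ∀ (a : Int) (memo : PySem.Dict (String × Int) Int), pvOk d memo →
      (us.foldl (fun acc u =>
          ((acc.1 + (pvMemoA fuel nd (u, s) acc.2).1, (pvMemoA fuel nd (u, s) acc.2).2) :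
            Int × PySem.Dict (String × Int) Int)) (a, memo)).1
          = a + (us.map (fun u => pvT d u s)).sum
        ∧ pvOk d (us.foldl (fun acc u =>
          ((acc.1 + (pvMemoA fuel nd (u, s) acc.2).1, (pvMemoA fuel nd (u, s) acc.2).2) :
            Int × PySem.Dict (String × Int) Int)) (a, memo)).2 := by
  intro us
  induction us with
  | nil =>
    intro s _ a memo hok
    constructor
    · simp
    · simpa using hok
  | cons u us ih =>
    intro s hHC a memo hok
    have hu := hHC u List.mem_cons_self
    have h1 := IH u s memo hok hu.1 hu.2
    simp only [List.foldl_cons]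
    have h2 := ih s (fun w hw => hHC w (List.mem_cons_of_mem _ hw))
      (a + (pvMemoA fuel nd (u, s) memo).1) (pvMemoA fuel nd (u, s) memo).2 h1.2
    refine ⟨?_, h2.2⟩
    rw [h2.1, h1.1]
    simp only [List.map_cons, List.sum_cons]
    ring

theorem pvMemoA_spec (d : List (String × List String)) (hpre : Pre_solution02 d) :
    ∀ (fuel : Nat) (n : String) (s : Int) (memo : PySem.Dict (String × Int) Int),
      pvOk d memo → pvHC d fuel n → pvReg d n →
      (pvMemoA fuel (pvNodesA d) (n, s) memo).1 = pvT d n s ∧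
        pvOk d (pvMemoA fuel (pvNodesA d) (n, s) memo).2 := by
  intro fuel
  induction fuel with
  | zero =>
    intro n s memo hok hHC _
    rw [pvMemoA.eq_def]
    cases hget : memo.get? (n, s) with
    | some v => exact ⟨hok n s v hget, hok⟩
    | none => exact absurd hHC (pvHC_zero d n)
  | succ fuel ih =>
    intro n s memo hok hHC hreg
    rw [pvMemoA.eq_def]
    cases hget : memo.get? (n, s) with
    | some v => exact ⟨hok n s v hget, hok⟩
    | none =>
      simp only []
      rw [pvStepA.eq_def]
      simp only []
      by_cases hn : n = "svr"
      · -- base case: score = s ("svr" is not special), return [s = 2]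
        subst hn
        simp only [if_pos rfl]
        norm_num
        have hTv : (if s = 2 then (1 : Int) else 0) = pvT d "svr" s := (pvT_base d s).symm
        have hsv : (if ("svr" : String) = "dac" ∨ ("svr" : String) = "fft" then s + 1 else s) = s := by
          simp
        constructor
        · rw [hsv, hTv]
        · rw [hsv, hTv]
          exact pvOk_insert d memo hok "svr" s
      · rw [if_neg hn]
        have hscore : (if n = "dac" ∨ n = "fft" then s + 1 else s) = s + pvDelta n := by
          unfold pvDelta
          split_ifs <;> ring
        simp only [hscore, pvInA d n]
        rw [← pvIn'_eq d n hn]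
        have hch : ∀ u ∈ pvIn' d n, pvHC d fuel u ∧ pvReg d u := by
          intro u hu
          have hedge : (u, n) ∈ pvE' d := (pvIn'_mem d u n).1 hu
          exact ⟨pvHC_child d fuel n u hHC hedge, pvRegStep d u n hedge hreg⟩
        obtain ⟨hf1, hf2⟩ := pvFoldA_spec d (pvNodesA d) fuel ih (pvIn' d n) (s + pvDelta n)
          hch 0 memo hok
        rw [zero_add] at hf1
        have hT : (pvT d n s) = _ := pvT_rec d hpre n hn hreg s
        constructor
        · rw [hf1, ← hT, PySem.Dict.getD_insert_self]
        · rw [hf1, ← hT]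
          exact pvOk_insert d _ hf2 n s

-- ---------- fuel adequacy and A's value ----------
theorem pvChainBound (d : List (String × List String)) (hpre : Pre_solution02 d)
    (l : List String) (hc : List.IsChain (pvR d) l) (hall : ∀ x ∈ l, pvReg d x) :
    l.length ≤ (pvNames d).length + 1 := by
  match l, hc, hall with
  | [], _, _ => simp
  | [x], _, _ => simp
  | x :: y :: t, hc, hall =>
    have hnd := pvChainNodup d hpre (x :: y :: t).length (x :: y :: t) (le_refl _) hc hall
    have hmem := pvChainMem d (x :: y :: t) hc (by simp)
    have := pvNodupLen (x :: y :: t) (pvNames d) hnd hmem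
    omega

theorem pvHC_all (d : List (String × List String)) (hpre : Pre_solution02 d)
    (n : String) (hreg : pvReg d n) : pvHC d ((pvNames d).length + 2) n := by
  intro l hc _ hlast
  have hall := pvChainRegAll d l hc n hlast hreg
  have := pvChainBound d hpre l hc hall
  omega

theorem pvOk_empty (d : List (String × List String)) : pvOk d PySem.Dict.empty := by
  intro n s v h
  rw [PySem.Dict.get?_empty] at h
  cases h

theorem pvA_eq (d : List (String × List String)) (hpre : Pre_solution02 d) :
    solution02 d = pvT d "out" 0 := by
  show (pvMemoA ((pvNames d).length + 2) (pvNodesA d) ("out", 0) PySem.Dict.empty).1 = _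
  exact (pvMemoA_spec d hpre _ "out" 0 PySem.Dict.empty (pvOk_empty d)
    (pvHC_all d hpre "out" (pvReg_out d)) (pvReg_out d)).1

-- ---------- B's scatter round computes the walk-count recurrence ----------
theorem pvAssocSome (L : List ((String × Int) × Int)) (K : String × Int) (w : Int) :
    (L.map Prod.fst).Nodup → (K, w) ∈ L →
    (L.map (fun p => if p.1 = K then p.2 else 0)).sum = w := by
  induction L with
  | nil => intro _ h; cases h
  | cons p t ih =>
    intro hnd hm
    simp only [List.map_cons, List.nodup_cons] at hnd
    rcases List.mem_cons.1 hm with rfl | hm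
    · simp only [List.map_cons, List.sum_cons, if_pos rfl]
      have hz : ∀ q ∈ t, (fun p => if p.1 = (K, w).1 then p.2 else 0) q = 0 := by
        intro q hq
        have : q.1 ≠ (K, w).1 := by
          intro he
          exact hnd.1 (he ▸ List.mem_map_of_mem hq)
        simp [this]
      rw [List.map_congr_left hz]
      simp [List.map_const']
    · have hne : p.1 ≠ K := by
        intro he
        apply hnd.1
        rw [he]
        exact List.mem_map_of_mem (f := Prod.fst) hm
      simp only [List.map_cons, List.sum_cons, if_neg hne, zero_add]
      exact ih hnd.2 hm

theorem pvAssocNone (L : List ((String × Int) × Int)) (K : String × Int) :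
    K ∉ L.map Prod.fst →
    (L.map (fun p => if p.1 = K then p.2 else 0)).sum = 0 := by
  induction L with
  | nil => intro _; simp
  | cons p t ih =>
    intro h
    simp only [List.map_cons, List.mem_cons, not_or] at h
    simp only [List.map_cons, List.sum_cons]
    rw [if_neg (fun he => h.1 he.symm), ih h.2, add_zero]

theorem pvItemsGetD (F : PySem.Dict (String × Int) Int) (hnd : F.keys.Nodup) (K : String × Int) :
    (F.items.map (fun p => if p.1 = K then p.2 else 0)).sum = F.getD K 0 := by
  cases hg : F.get? K with
  | some w =>
    rw [PySem.Dict.getD_of_get?_eq_some (h := hg)]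
    exact pvAssocSome F.items K w (by simpa [PySem.Dict.keys] using hnd)
      (PySem.Dict.mem_items_of_get?_eq_some (h := hg))
  | none =>
    rw [PySem.Dict.getD_of_get?_eq_none (h := hg)]
    apply pvAssocNone
    have := (PySem.Dict.get?_eq_none_iff_not_mem_keys _ _).1 hg
    simpa [PySem.Dict.keys] using this

theorem pvPushInner (outs : List String) (s' c : Int) (v : String) (s : Int) :
    ∀ nxt : PySem.Dict (String × Int) Int,
      (outs.foldl (fun nxt b =>
          if b = "svr" then nxt
          else nxt.insert (b, s' + (if b = "dac" ∨ b = "fft" then (1 : Int) else 0))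
            (nxt.getD (b, s' + (if b = "dac" ∨ b = "fft" then (1 : Int) else 0)) 0 + c)) nxt).getD
          (v, s) 0
        = nxt.getD (v, s) 0
          + (outs.map (fun b =>
              if ¬ b = "svr" ∧ b = v ∧ s' + pvDelta b = s then c else 0)).sum := by
  induction outs with
  | nil => intro nxt; simp
  | cons b t ih =>
    intro nxt
    simp only [List.foldl_cons, List.map_cons, List.sum_cons]
    by_cases hb : b = "svr"
    · rw [if_pos hb, ih]
      rw [if_neg (show ¬ (¬ b = "svr" ∧ b = v ∧ s' + pvDelta b = s) from fun h => h.1 hb)]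
      ring
    · rw [if_neg hb, ih, PySem.Dict.getD_insert]
      by_cases h : b = v ∧ s' + pvDelta b = s
      · have hkey : ((v, s) : String × Int)
            = (b, s' + (if b = "dac" ∨ b = "fft" then (1 : Int) else 0)) := by
          rw [Prod.mk.injEq]
          exact ⟨h.1.symm, h.2.symm⟩
        rw [if_pos hkey,
          if_pos (show ¬ b = "svr" ∧ b = v ∧ s' + pvDelta b = s from ⟨hb, h⟩), ← hkey]
        ring
      · have hkey : ¬ ((v, s) : String × Int)
            = (b, s' + (if b = "dac" ∨ b = "fft" then (1 : Int) else 0)) := fun hk =>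
          h ⟨(congrArg Prod.fst hk).symm, (congrArg Prod.snd hk).symm⟩
        rw [if_neg hkey,
          if_neg (show ¬ (¬ b = "svr" ∧ b = v ∧ s' + pvDelta b = s) from fun hh => h ⟨hh.2.1, hh.2.2⟩)]
        ring

theorem pvPushItems (out : PySem.Dict String (List String)) (v : String) (s : Int) :
    ∀ (L : List ((String × Int) × Int)) (acc : PySem.Dict (String × Int) Int),
      (L.foldl (fun nxt p =>
          (out.getD p.1.1 []).foldl (fun nxt b =>
            if b = "svr" then nxt
            else nxt.insert (b, p.1.2 + (if b = "dac" ∨ b = "fft" then (1 : Int) else 0))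
              (nxt.getD (b, p.1.2 + (if b = "dac" ∨ b = "fft" then (1 : Int) else 0)) 0 + p.2))
            nxt) acc).getD (v, s) 0
        = acc.getD (v, s) 0
          + (L.map (fun p =>
              ((out.getD p.1.1 []).map
                (fun b => if ¬ b = "svr" ∧ b = v ∧ p.1.2 + pvDelta b = s then p.2 else 0)).sum)).sum := by
  intro L
  induction L with
  | nil => intro acc; simp
  | cons p t ih =>
    intro acc
    simp only [List.foldl_cons, List.map_cons, List.sum_cons]
    rw [ih, pvPushInner]
    ring

theorem pvPush_getD (d : List (String × List String)) (F : PySem.Dict (String × Int) Int)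
    (hnd : F.keys.Nodup) (v : String) (s : Int) :
    (pvPush (pvOutB d) F).getD (v, s) 0
      = ((pvIn' d v).map (fun u => F.getD (u, s - pvDelta v) 0)).sum := by
  unfold pvPush
  rw [pvPushItems]
  rw [PySem.Dict.getD_empty, zero_add]
  have hinner : ∀ p ∈ F.items,
      (((pvOutB d).getD p.1.1 []).map
        (fun b => if ¬ b = "svr" ∧ b = v ∧ p.1.2 + pvDelta b = s then p.2 else 0)).sum
      = ((pvE d).map (fun e =>
          if e.1 = p.1.1
          then (if ¬ e.2 = "svr" ∧ e.2 = v ∧ p.1.2 + pvDelta e.2 = s then p.2 else 0)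
          else 0)).sum := by
    intro p _
    rw [pvOutB_getD, List.map_map, pvSum_filter]
    apply pvSum_congr
    intro e _
    simp only [Function.comp_apply, decide_eq_true_eq]
  rw [List.map_congr_left hinner, pvSum_swap]
  have hright : pvIn' d v = ((pvE d).filter
      (fun e => decide (e.2 = v) && decide (¬ e.2 = "svr"))).map Prod.fst := by
    unfold pvIn' pvE'
    rw [List.filter_filter]
  rw [hright, List.map_map, pvSum_filter]
  apply pvSum_congr
  intro e _
  simp only [Function.comp_apply, Bool.and_eq_true, decide_eq_true_eq]
  by_cases hev : e.2 = v ∧ ¬ e.2 = "svr"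
  · rw [if_pos hev]
    have hcong : ∀ p ∈ F.items,
        (if e.1 = p.1.1
          then (if ¬ e.2 = "svr" ∧ e.2 = v ∧ p.1.2 + pvDelta e.2 = s then p.2 else 0)
          else 0)
          = (if p.1 = (e.1, s - pvDelta v) then p.2 else 0) := by
      intro p _
      by_cases h1 : p.1 = (e.1, s - pvDelta v)
      · rw [if_pos h1]
        have he1 : e.1 = p.1.1 := by rw [h1]
        have he2 : p.1.2 + pvDelta e.2 = s := by rw [h1, hev.1]; ring
        rw [if_pos he1, if_pos ⟨hev.2, hev.1, he2⟩]
      · rw [if_neg h1]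
        by_cases h2 : e.1 = p.1.1
        · rw [if_pos h2]
          by_cases h3 : ¬ e.2 = "svr" ∧ e.2 = v ∧ p.1.2 + pvDelta e.2 = s
          · exfalso
            apply h1
            have h4 : p.1.2 = s - pvDelta v := by
              have h5 := h3.2.2
              rw [hev.1] at h5
              omega
            rw [Prod.ext_iff]
            exact ⟨h2.symm, h4⟩
          · rw [if_neg h3]
        · rw [if_neg h2]
    rw [List.map_congr_left hcong]
    exact pvItemsGetD F hnd (e.1, s - pvDelta v)
  · rw [if_neg hev]
    have hz : ∀ p ∈ F.items,
        (if e.1 = p.1.1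
          then (if ¬ e.2 = "svr" ∧ e.2 = v ∧ p.1.2 + pvDelta e.2 = s then p.2 else 0)
          else 0) = 0 := by
      intro p _
      by_cases h2 : e.1 = p.1.1
      · rw [if_pos h2, if_neg (fun hh => hev ⟨hh.2.1, hh.1⟩)]
      · rw [if_neg h2]
    rw [List.map_congr_left hz]
    simp [List.map_const']

-- ---------- B's loop: levels compute pvC, the answer is pvT ----------
def pvLvl (d : List (String × List String)) : Nat → PySem.Dict (String × Int) Int
  | 0 => PySem.Dict.empty.insert
      (("svr" : String), if ("svr" : String) = "dac" ∨ ("svr" : String) = "fft" then (1 : Int) else 0) 1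
  | r + 1 => pvPush (pvOutB d) (pvLvl d r)

theorem pvFoldSkip {σ : Type} (l : List String) (f : σ → String → σ) (init : σ) :
    l.foldl (fun s b => if b = "svr" then s else f s b) init
      = (l.filter (fun b => decide (¬ b = "svr"))).foldl f init := by
  induction l generalizing init with
  | nil => rfl
  | cons b t ih =>
    by_cases h : b = "svr" <;> simp [List.filter_cons, h, ih]

theorem pvPush_nodup_aux (out : PySem.Dict String (List String)) :
    ∀ (L : List ((String × Int) × Int)) (acc : PySem.Dict (String × Int) Int),
      acc.keys.Nodup →
      (L.foldl (fun nxt p =>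
          (out.getD p.1.1 []).foldl (fun nxt b =>
            if b = "svr" then nxt
            else nxt.insert (b, p.1.2 + (if b = "dac" ∨ b = "fft" then (1 : Int) else 0))
              (nxt.getD (b, p.1.2 + (if b = "dac" ∨ b = "fft" then (1 : Int) else 0)) 0 + p.2))
            nxt) acc).keys.Nodup := by
  intro L
  induction L with
  | nil => exact fun acc h => h
  | cons p t ih =>
    intro acc h
    refine ih _ ?_
    have hb : (((out.getD p.1.1 []).foldl (fun nxt b =>
        if b = "svr" then nxt
        else nxt.insert (b, p.1.2 + (if b = "dac" ∨ b = "fft" then (1 : Int) else 0))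
          (nxt.getD (b, p.1.2 + (if b = "dac" ∨ b = "fft" then (1 : Int) else 0)) 0 + p.2))
        acc).keys).Nodup := by
      rw [pvFoldSkip]
      exact PySem.Dict.nodup_keys_foldl_insert_key
        ((out.getD p.1.1 []).filter (fun b => decide (¬ b = "svr")))
        (fun b => ((b, p.1.2 + (if b = "dac" ∨ b = "fft" then (1 : Int) else 0)) : String × Int))
        (fun nxt b => nxt.getD (b, p.1.2 + (if b = "dac" ∨ b = "fft" then (1 : Int) else 0)) 0 + p.2)
        acc h
    exact hb

theorem pvPush_nodup (out : PySem.Dict String (List String))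
    (f : PySem.Dict (String × Int) Int) : (pvPush out f).keys.Nodup := by
  unfold pvPush
  exact pvPush_nodup_aux out f.items PySem.Dict.empty (by simp [PySem.Dict.nodup_keys_empty])

theorem pvLvl_nodup (d : List (String × List String)) : ∀ r, (pvLvl d r).keys.Nodup
  | 0 => PySem.Dict.nodup_keys_insert _ _ _ PySem.Dict.nodup_keys_empty
  | r + 1 => pvPush_nodup _ _

theorem pvLvl_getD (d : List (String × List String)) :
    ∀ (r : Nat) (v : String) (s : Int), (pvLvl d r).getD (v, s) 0 = pvC d r v s := by
  intro r
  induction r with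
  | zero =>
    intro v s
    unfold pvLvl pvC
    rw [PySem.Dict.getD_insert]
    have hd : (if ("svr" : String) = "dac" ∨ ("svr" : String) = "fft" then (1 : Int) else 0)
        = pvDelta "svr" := rfl
    rw [hd]
    by_cases h : v = "svr" ∧ s = pvDelta "svr"
    · have hp : ((v, s) : String × Int) = ("svr", pvDelta "svr") := by
        rw [Prod.mk.injEq]; exact h
      rw [if_pos hp, if_pos h]
    · have hp : ((v, s) : String × Int) ≠ ("svr", pvDelta "svr") := by
        rw [Ne, Prod.mk.injEq]; exact h
      rw [if_neg hp, if_neg h]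
      simp
  | succ r ih =>
    intro v s
    show (pvPush (pvOutB d) (pvLvl d r)).getD (v, s) 0 = _
    rw [pvPush_getD d _ (pvLvl_nodup d r) v s]
    rw [List.map_congr_left (fun u _ => ih u (s - pvDelta v))]
    simp [pvC]

theorem pvLoop (d : List (String × List String)) :
    ∀ (m : Nat) (a : Int) (r : Nat),
      (List.range m).foldl
        (fun st _ => (st.1 + st.2.getD (("out" : String), (2 : Int)) 0, pvPush (pvOutB d) st.2))
        (a, pvLvl d r)
      = (a + ((List.range m).map (fun t => pvC d (r + t) "out" 2)).sum, pvLvl d (r + m)) := by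
  intro m
  induction m with
  | zero => intro a r; simp
  | succ m ih =>
    intro a r
    rw [List.range_succ, List.foldl_append, ih]
    simp only [List.foldl_cons, List.foldl_nil]
    rw [pvLvl_getD]
    rw [List.map_append, List.sum_append]
    refine Prod.ext ?_ ?_
    · simp [add_assoc]
    · show pvPush (pvOutB d) (pvLvl d (r + m)) = pvLvl d (r + m + 1)
      rfl

theorem pvB_eq (d : List (String × List String)) : solution02_alt d = pvT d "out" 0 := by
  show ((List.range ((pvOutB d).size + 1)).foldl
      (fun st _ => (st.1 + st.2.getD (("out" : String), (2 : Int)) 0, pvPush (pvOutB d) st.2))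
      ((0 : Int), pvLvl d 0)).1 = _
  rw [pvLoop d ((pvOutB d).size + 1) 0 0]
  show 0 + ((List.range (pvNB d + 1)).map (fun t => pvC d (0 + t) "out" 2)).sum = _
  rw [zero_add]
  unfold pvT
  apply pvSum_congr
  intro t _
  norm_num

theorem pv_main (input_data : List (String × List String))
    (hpre : Pre_solution02 input_data) :
    solution02 input_data = solution02_alt input_data := by
  exact (pvA_eq input_data hpre).trans (pvB_eq input_data).symm

-- ===== VERDICT (by name: the statement is the Claim_ definition above) =====
theorem solution02_spec : Claim_equal_solution02 := by
  intro d _ hpre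
  unfold Spec_solution02
  exact pv_main d hpre
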